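-- pv_equiv track=rewrite | github.com/lraut-hub/Crypto-Risk-Assessment-Tool | backend/services/entity_resolver.py | _detect_evm_chain
-- ===== SOURCE A (Python) =====
-- from typing import Optional, Dict, Any
--
-- EVM_CHAINS = {
--     "ethereum", "polygon-pos", "binance-smart-chain", "avalanche",
--     "arbitrum-one", "optimistic-ethereum", "fantom", "base",
--     "cronos", "gnosis", "celo", "harmony-shard-0", "moonbeam",
--     "moonriver", "aurora", "boba", "metis-andromeda", "zksync",
-- }
--
-- def _detect_evm_chain(platforms: Dict[str, str]) -> Optional[str]:
--     """Find the primary EVM chain from CoinGecko platform data."""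
--     for chain in ["ethereum", "binance-smart-chain", "polygon-pos",
--                    "arbitrum-one", "optimistic-ethereum", "base",
--                    "avalanche", "fantom"]:
--         if chain in platforms and platforms[chain]:
--             return chain
--     # Check any remaining EVM chain
--     for chain, addr in platforms.items():
--         if chain in EVM_CHAINS and addr:
--             return chain
--     return None
-- ===== SOURCE B (Python) =====
-- from typing import Optional, Dict
--
-- EVM_CHAINS = {
--     "ethereum", "polygon-pos", "binance-smart-chain", "avalanche",
--     "arbitrum-one", "optimistic-ethereum", "fantom", "base",
--     "cronos", "gnosis", "celo", "harmony-shard-0", "moonbeam",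
--     "moonriver", "aurora", "boba", "metis-andromeda", "zksync",
-- }
--
-- _PRIORITY = ["ethereum", "binance-smart-chain", "polygon-pos",
--              "arbitrum-one", "optimistic-ethereum", "base",
--              "avalanche", "fantom"]
-- _RANK = {c: i for i, c in enumerate(_PRIORITY)}
--
-- def _detect_evm_chain(platforms: Dict[str, str]) -> Optional[str]:
--     """Find the primary EVM chain from CoinGecko platform data (single pass)."""
--     best = None
--     best_rank = len(_PRIORITY) + 1
--     for chain, addr in platforms.items():
--         if addr and chain in EVM_CHAINS:
--             r = _RANK.get(chain, len(_PRIORITY))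
--             if r < best_rank:
--                 best, best_rank = chain, r
--     return best
-- ===== Notes on version B (the rewrite author's own statement) =====
-- stated objective: alternative
-- what changed: Replaces A's two sequential scans (probe 8 priority chains against the dict, then scan dict items for any remaining EVM chain) by a single pass over platforms.items() that tracks the candidate with minimum priority rank (rank dict built once, sentinel rank 8 for non-priority EVM chains, strict < keeps the first-seen candidate among equal ranks).
import Mathlib
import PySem

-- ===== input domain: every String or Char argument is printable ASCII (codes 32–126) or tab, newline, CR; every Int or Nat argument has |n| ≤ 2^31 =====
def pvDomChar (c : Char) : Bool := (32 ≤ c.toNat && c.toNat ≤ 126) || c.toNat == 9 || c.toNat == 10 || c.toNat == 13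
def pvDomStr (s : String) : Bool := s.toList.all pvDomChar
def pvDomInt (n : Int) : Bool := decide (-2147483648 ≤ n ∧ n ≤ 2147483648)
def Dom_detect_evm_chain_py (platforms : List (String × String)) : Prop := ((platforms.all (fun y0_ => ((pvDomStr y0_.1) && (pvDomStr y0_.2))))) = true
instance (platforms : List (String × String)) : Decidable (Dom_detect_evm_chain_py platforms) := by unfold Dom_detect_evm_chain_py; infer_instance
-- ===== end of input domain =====

-- B replaces A's two sequential scans (priority list probe, then dict scan) by one pass over the
-- items tracking the minimum-priority-rank candidate; same return value, objective: alternative.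

-- EVM_CHAINS (module constant shared by both implementations)
def pvEVM : PySem.Set String := PySem.Set.ofList
  ["ethereum", "polygon-pos", "binance-smart-chain", "avalanche",
   "arbitrum-one", "optimistic-ethereum", "fantom", "base",
   "cronos", "gnosis", "celo", "harmony-shard-0", "moonbeam",
   "moonriver", "aurora", "boba", "metis-andromeda", "zksync"]

-- ===== PORT A =====
def detect_evm_chain_py (platforms : List (String × String)) : Option String :=
  let d := PySem.Dict.ofList platforms
  match (["ethereum", "binance-smart-chain", "polygon-pos",
          "arbitrum-one", "optimistic-ethereum", "base",
          "avalanche", "fantom"].find?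
          (fun chain => d.contains chain && (d.getD chain "" != ""))) with
  | some chain => some chain
  | none =>
    (d.items.find? (fun p => pvEVM.contains p.1 && p.2 != "")).map (fun p => p.1)

-- ===== PORT B =====
-- _PRIORITY
def pvPriority : List String :=
  ["ethereum", "binance-smart-chain", "polygon-pos",
   "arbitrum-one", "optimistic-ethereum", "base",
   "avalanche", "fantom"]

-- _RANK = {c: i for i, c in enumerate(_PRIORITY)}
def pvRank : PySem.Dict String Int :=
  PySem.Dict.ofList ((PySem.List.enumerate pvPriority).map (fun p => (p.2, p.1)))

def detect_evm_chain_py_alt (platforms : List (String × String)) : Option String :=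
  let d := PySem.Dict.ofList platforms
  (d.items.foldl
    (fun s p =>
      if p.2 != "" && pvEVM.contains p.1 then
        let r := pvRank.getD p.1 8
        if r < s.2 then (some p.1, r) else s
      else s)
    ((none : Option String), (9 : Int))).1

-- ===== PRECONDITION & SPEC =====
def Spec_detect_evm_chain_py (platforms : List (String × String)) (out : Option String) : Prop := out = detect_evm_chain_py_alt platforms
instance (platforms : List (String × String)) (out : Option String) : Decidable (Spec_detect_evm_chain_py platforms out) := by unfold Spec_detect_evm_chain_py; infer_instance

-- ===== CLAIM (what is proved, stated in full; the proofs are below) =====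
def Claim_equal_detect_evm_chain_py : Prop := ∀ (platforms : List (String × String)), Dom_detect_evm_chain_py platforms → Spec_detect_evm_chain_py platforms (detect_evm_chain_py platforms)

-- ===== LEMMAS AND PROOFS =====

-- B's loop body, named for the proofs
def pvStep (s : Option String × Int) (p : String × String) : Option String × Int :=
  if p.2 != "" && pvEVM.contains p.1 then
    (if pvRank.getD p.1 8 < s.2 then (some p.1, pvRank.getD p.1 8) else s)
  else s

lemma alt_eq_foldl (platforms : List (String × String)) :
    detect_evm_chain_py_alt platforms
      = ((PySem.Dict.ofList platforms).items.foldl pvStep (none, 9)).1 := rfl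

lemma rank_of_not_mem {c : String} (h : c ∉ pvPriority) : pvRank.getD c 8 = 8 := by
  apply PySem.Dict.getD_of_not_contains _ _
  rw [PySem.Dict.contains_eq_decide_mem_keys]
  simpa [show pvRank.keys = pvPriority from by decide] using h

lemma mem_priority_iff (c : String) :
    c ∈ pvPriority ↔ (c = "ethereum" ∨ c = "binance-smart-chain" ∨ c = "polygon-pos" ∨
      c = "arbitrum-one" ∨ c = "optimistic-ethereum" ∨ c = "base" ∨
      c = "avalanche" ∨ c = "fantom") := by
  simp [pvPriority]

lemma rank_mem_bounds {c : String} (hc : c ∈ pvPriority) :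
    0 ≤ pvRank.getD c 8 ∧ pvRank.getD c 8 < 8 := by
  rw [mem_priority_iff] at hc
  rcases hc with h|h|h|h|h|h|h|h <;> subst h <;> decide

lemma rank_inj {c c' : String} (hc : c ∈ pvPriority) (hc' : c' ∈ pvPriority)
    (h : pvRank.getD c 8 = pvRank.getD c' 8) : c = c' := by
  rw [mem_priority_iff] at hc hc'
  rcases hc with g|g|g|g|g|g|g|g <;> subst g <;>
    rcases hc' with g|g|g|g|g|g|g|g <;> subst g <;>
    first | rfl | exact absurd h (by decide)

lemma priority_evm {c : String} (hc : c ∈ pvPriority) : pvEVM.contains c = true := by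
  rw [mem_priority_iff] at hc
  rcases hc with h|h|h|h|h|h|h|h <;> subst h <;> decide

-- pred1 (A's first-loop test) holds iff the dict has an entry (c, a) with a non-empty
lemma pred1_iff (d : PySem.Dict String String) (hnd : d.keys.Nodup) (c : String) :
    (d.contains c && (d.getD c "" != "")) = true ↔ ∃ a, (c, a) ∈ d.items ∧ a ≠ "" := by
  constructor
  · intro h
    rw [Bool.and_eq_true] at h
    obtain ⟨h1, h2⟩ := h
    rw [PySem.Dict.contains_eq_isSome_get?] at h1
    obtain ⟨a, ha⟩ := Option.isSome_iff_exists.mp h1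
    refine ⟨a, PySem.Dict.mem_items_of_get?_eq_some d ha, ?_⟩
    have hg : d.getD c "" = a := PySem.Dict.getD_of_get?_eq_some d "" ha
    simpa [hg] using h2
  · rintro ⟨a, hm, hne⟩
    have hg : d.get? c = some a := PySem.Dict.get?_of_mem_items d hm hnd
    rw [Bool.and_eq_true, PySem.Dict.contains_eq_isSome_get?, hg,
      PySem.Dict.getD_of_get?_eq_some d "" hg]
    simpa using hne

lemma fold_stable (l : List (String × String)) (s : Option String × Int)
    (h : ∀ p ∈ l, (p.2 != "" && pvEVM.contains p.1) = true → ¬ (pvRank.getD p.1 8 < s.2)) :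
    l.foldl pvStep s = s := by
  induction l with
  | nil => rfl
  | cons p t ih =>
    have hstep : pvStep s p = s := by
      unfold pvStep
      by_cases hc : (p.2 != "" && pvEVM.contains p.1) = true
      · rw [if_pos hc, if_neg (h p (List.mem_cons_self ..) hc)]
      · rw [if_neg hc]
    simp only [List.foldl_cons, hstep]
    exact ih (fun q hq hcq => h q (List.mem_cons_of_mem _ hq) hcq)

lemma fold_min (l : List (String × String)) (s : Option String × Int) (c0 : String) (a0 : String)
    (hmem : (c0, a0) ∈ l) (hca : (a0 != "" && pvEVM.contains c0) = true)
    (hr : pvRank.getD c0 8 < s.2)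
    (hmin : ∀ p ∈ l, (p.2 != "" && pvEVM.contains p.1) = true →
      pvRank.getD c0 8 ≤ pvRank.getD p.1 8)
    (huniq : ∀ p ∈ l, (p.2 != "" && pvEVM.contains p.1) = true →
      pvRank.getD p.1 8 = pvRank.getD c0 8 → p.1 = c0) :
    (l.foldl pvStep s).1 = some c0 := by
  induction l generalizing s with
  | nil => simp at hmem
  | cons p t ih =>
    rw [List.foldl_cons]
    by_cases hcp : (p.2 != "" && pvEVM.contains p.1) = true
    · by_cases hlt : pvRank.getD p.1 8 < s.2
      · have hstep : pvStep s p = (some p.1, pvRank.getD p.1 8) := by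
          unfold pvStep; rw [if_pos hcp, if_pos hlt]
        rw [hstep]
        by_cases hpc : p.1 = c0
        · have hstab : t.foldl pvStep (some p.1, pvRank.getD p.1 8)
              = (some p.1, pvRank.getD p.1 8) := by
            apply fold_stable
            intro q hq hcq
            have hle := hmin q (List.mem_cons_of_mem _ hq) hcq
            rw [hpc]
            show ¬ pvRank.getD q.1 8 < pvRank.getD c0 8
            omega
          rw [hstab, hpc]
        · have hle := hmin p (List.mem_cons_self ..) hcp
          have hne : pvRank.getD p.1 8 ≠ pvRank.getD c0 8 :=
            fun he => hpc (huniq p (List.mem_cons_self ..) hcp he)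
          have hmem' : (c0, a0) ∈ t := by
            rcases List.mem_cons.mp hmem with he | ht
            · exact absurd (congrArg Prod.fst he).symm hpc
            · exact ht
          refine ih _ hmem' ?_
            (fun q hq hcq => hmin q (List.mem_cons_of_mem _ hq) hcq)
            (fun q hq hcq => huniq q (List.mem_cons_of_mem _ hq) hcq)
          show pvRank.getD c0 8 < pvRank.getD p.1 8
          omega
      · have hstep : pvStep s p = s := by
          unfold pvStep; rw [if_pos hcp, if_neg hlt]
        have hmem' : (c0, a0) ∈ t := by
          rcases List.mem_cons.mp hmem with he | ht
          · exact absurd hr (by simpa [← he] using hlt)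
          · exact ht
        rw [hstep]
        exact ih _ hmem' hr
          (fun q hq hcq => hmin q (List.mem_cons_of_mem _ hq) hcq)
          (fun q hq hcq => huniq q (List.mem_cons_of_mem _ hq) hcq)
    · have hstep : pvStep s p = s := by
        unfold pvStep; rw [if_neg hcp]
      have hmem' : (c0, a0) ∈ t := by
        rcases List.mem_cons.mp hmem with he | ht
        · exact absurd (by simpa [← he] using hca) hcp
        · exact ht
      rw [hstep]
      exact ih _ hmem' hr
        (fun q hq hcq => hmin q (List.mem_cons_of_mem _ hq) hcq)
        (fun q hq hcq => huniq q (List.mem_cons_of_mem _ hq) hcq)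

lemma fold_first8 (l : List (String × String))
    (h : ∀ p ∈ l, (p.2 != "" && pvEVM.contains p.1) = true → pvRank.getD p.1 8 = 8) :
    (l.foldl pvStep ((none : Option String), (9 : Int))).1
      = (l.find? (fun p => pvEVM.contains p.1 && p.2 != "")).map (fun p => p.1) := by
  induction l with
  | nil => rfl
  | cons p t ih =>
    by_cases hcp : (p.2 != "" && pvEVM.contains p.1) = true
    · have h8 : pvRank.getD p.1 8 = 8 := h p (List.mem_cons_self ..) hcp
      have hstep : pvStep (none, 9) p = (some p.1, (8 : Int)) := by
        unfold pvStep
        rw [if_pos hcp, h8, if_pos (by norm_num : (8 : Int) < ((none : Option String), (9 : Int)).2)]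
      have hstab : t.foldl pvStep (some p.1, (8 : Int)) = (some p.1, (8 : Int)) := by
        apply fold_stable
        intro q hq hcq
        rw [h q (List.mem_cons_of_mem _ hq) hcq]
        show ¬ (8 : Int) < 8
        omega
      have hcp' : (pvEVM.contains p.1 && p.2 != "") = true := by
        rw [Bool.and_comm]; exact hcp
      rw [List.foldl_cons, hstep, hstab,
        List.find?_cons_of_pos (p := fun q : String × String => pvEVM.contains q.1 && q.2 != "") hcp']
      rfl
    · have hstep : pvStep (none, 9) p = (none, 9) := by
        unfold pvStep; rw [if_neg hcp]
      have hcp' : ¬ (pvEVM.contains p.1 && p.2 != "") = true := by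
        rw [Bool.and_comm]; exact hcp
      rw [List.foldl_cons, hstep,
        List.find?_cons_of_neg (p := fun q : String × String => pvEVM.contains q.1 && q.2 != "") hcp']
      exact ih (fun q hq => h q (List.mem_cons_of_mem _ hq))

lemma fold_of_priority (d : PySem.Dict String String) (hnd : d.keys.Nodup)
    (c0 : String) (hc0 : c0 ∈ pvPriority)
    (hp : (d.contains c0 && (d.getD c0 "" != "")) = true)
    (hmin : ∀ c' ∈ pvPriority, pvRank.getD c' 8 < pvRank.getD c0 8 →
      ¬ (d.contains c' && (d.getD c' "" != "")) = true) :
    (d.items.foldl pvStep ((none : Option String), (9 : Int))).1 = some c0 := by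
  obtain ⟨a0, hm0, hne0⟩ := (pred1_iff d hnd c0).mp hp
  apply fold_min d.items (none, 9) c0 a0 hm0
  · rw [Bool.and_eq_true]
    exact ⟨by simpa using hne0, priority_evm hc0⟩
  · have hb := (rank_mem_bounds hc0).2
    show pvRank.getD c0 8 < (9 : Int)
    omega
  · intro p hp2 hcp
    rcases le_or_gt (pvRank.getD c0 8) (pvRank.getD p.1 8) with hle | hlt
    · exact hle
    exfalso
    have hpm : p.1 ∈ pvPriority := by
      by_contra hnm
      rw [rank_of_not_mem hnm] at hlt
      have := (rank_mem_bounds hc0).2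
      omega
    apply hmin p.1 hpm hlt
    rw [pred1_iff d hnd]
    refine ⟨p.2, by simpa using hp2, ?_⟩
    have := (Bool.and_eq_true _ _).mp hcp |>.1
    simpa using this
  · intro p hp2 hcp heq
    by_cases hpm : p.1 ∈ pvPriority
    · exact rank_inj hpm hc0 heq
    · rw [rank_of_not_mem hpm] at heq
      have := (rank_mem_bounds hc0).2
      omega

-- A's whole body over an arbitrary dict with Nodup keys equals B's fold
lemma core (d : PySem.Dict String String) (hnd : d.keys.Nodup) :
    (match (["ethereum", "binance-smart-chain", "polygon-pos",
             "arbitrum-one", "optimistic-ethereum", "base",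
             "avalanche", "fantom"].find?
             (fun chain => d.contains chain && (d.getD chain "" != ""))) with
     | some chain => some chain
     | none => (d.items.find? (fun p => pvEVM.contains p.1 && p.2 != "")).map (fun p => p.1))
      = (d.items.foldl pvStep ((none : Option String), (9 : Int))).1 := by
  by_cases h0 : (d.contains "ethereum" && (d.getD "ethereum" "" != "")) = true
  · rw [List.find?_cons_of_pos (p := fun chain => d.contains chain && (d.getD chain "" != "")) h0]
    refine (fold_of_priority d hnd _ (by decide) h0 ?_).symm
    intro c' hc' hlt
    have := (rank_mem_bounds hc').1
    rw [show pvRank.getD "ethereum" 8 = 0 from by decide] at hlt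
    omega
  rw [List.find?_cons_of_neg (p := fun chain => d.contains chain && (d.getD chain "" != "")) h0]
  by_cases h1 : (d.contains "binance-smart-chain" && (d.getD "binance-smart-chain" "" != "")) = true
  · rw [List.find?_cons_of_pos (p := fun chain => d.contains chain && (d.getD chain "" != "")) h1]
    refine (fold_of_priority d hnd _ (by decide) h1 ?_).symm
    intro c' hc' hlt
    rw [show pvRank.getD "binance-smart-chain" 8 = 1 from by decide] at hlt
    rw [mem_priority_iff] at hc'
    rcases hc' with h|h|h|h|h|h|h|h <;> subst h <;>
      first | exact h0 | exact absurd hlt (by decide)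
  rw [List.find?_cons_of_neg (p := fun chain => d.contains chain && (d.getD chain "" != "")) h1]
  by_cases h2 : (d.contains "polygon-pos" && (d.getD "polygon-pos" "" != "")) = true
  · rw [List.find?_cons_of_pos (p := fun chain => d.contains chain && (d.getD chain "" != "")) h2]
    refine (fold_of_priority d hnd _ (by decide) h2 ?_).symm
    intro c' hc' hlt
    rw [show pvRank.getD "polygon-pos" 8 = 2 from by decide] at hlt
    rw [mem_priority_iff] at hc'
    rcases hc' with h|h|h|h|h|h|h|h <;> subst h <;>
      first | exact h0 | exact h1 | exact absurd hlt (by decide)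
  rw [List.find?_cons_of_neg (p := fun chain => d.contains chain && (d.getD chain "" != "")) h2]
  by_cases h3 : (d.contains "arbitrum-one" && (d.getD "arbitrum-one" "" != "")) = true
  · rw [List.find?_cons_of_pos (p := fun chain => d.contains chain && (d.getD chain "" != "")) h3]
    refine (fold_of_priority d hnd _ (by decide) h3 ?_).symm
    intro c' hc' hlt
    rw [show pvRank.getD "arbitrum-one" 8 = 3 from by decide] at hlt
    rw [mem_priority_iff] at hc'
    rcases hc' with h|h|h|h|h|h|h|h <;> subst h <;>
      first | exact h0 | exact h1 | exact h2 | exact absurd hlt (by decide)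
  rw [List.find?_cons_of_neg (p := fun chain => d.contains chain && (d.getD chain "" != "")) h3]
  by_cases h4 : (d.contains "optimistic-ethereum" && (d.getD "optimistic-ethereum" "" != "")) = true
  · rw [List.find?_cons_of_pos (p := fun chain => d.contains chain && (d.getD chain "" != "")) h4]
    refine (fold_of_priority d hnd _ (by decide) h4 ?_).symm
    intro c' hc' hlt
    rw [show pvRank.getD "optimistic-ethereum" 8 = 4 from by decide] at hlt
    rw [mem_priority_iff] at hc'
    rcases hc' with h|h|h|h|h|h|h|h <;> subst h <;>
      first | exact h0 | exact h1 | exact h2 | exact h3 | exact absurd hlt (by decide)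
  rw [List.find?_cons_of_neg (p := fun chain => d.contains chain && (d.getD chain "" != "")) h4]
  by_cases h5 : (d.contains "base" && (d.getD "base" "" != "")) = true
  · rw [List.find?_cons_of_pos (p := fun chain => d.contains chain && (d.getD chain "" != "")) h5]
    refine (fold_of_priority d hnd _ (by decide) h5 ?_).symm
    intro c' hc' hlt
    rw [show pvRank.getD "base" 8 = 5 from by decide] at hlt
    rw [mem_priority_iff] at hc'
    rcases hc' with h|h|h|h|h|h|h|h <;> subst h <;>
      first | exact h0 | exact h1 | exact h2 | exact h3 | exact h4 | exact absurd hlt (by decide)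
  rw [List.find?_cons_of_neg (p := fun chain => d.contains chain && (d.getD chain "" != "")) h5]
  by_cases h6 : (d.contains "avalanche" && (d.getD "avalanche" "" != "")) = true
  · rw [List.find?_cons_of_pos (p := fun chain => d.contains chain && (d.getD chain "" != "")) h6]
    refine (fold_of_priority d hnd _ (by decide) h6 ?_).symm
    intro c' hc' hlt
    rw [show pvRank.getD "avalanche" 8 = 6 from by decide] at hlt
    rw [mem_priority_iff] at hc'
    rcases hc' with h|h|h|h|h|h|h|h <;> subst h <;>
      first | exact h0 | exact h1 | exact h2 | exact h3 | exact h4 | exact h5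
            | exact absurd hlt (by decide)
  rw [List.find?_cons_of_neg (p := fun chain => d.contains chain && (d.getD chain "" != "")) h6]
  by_cases h7 : (d.contains "fantom" && (d.getD "fantom" "" != "")) = true
  · rw [List.find?_cons_of_pos (p := fun chain => d.contains chain && (d.getD chain "" != "")) h7]
    refine (fold_of_priority d hnd _ (by decide) h7 ?_).symm
    intro c' hc' hlt
    rw [show pvRank.getD "fantom" 8 = 7 from by decide] at hlt
    rw [mem_priority_iff] at hc'
    rcases hc' with h|h|h|h|h|h|h|h <;> subst h <;>
      first | exact h0 | exact h1 | exact h2 | exact h3 | exact h4 | exact h5 | exact h6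
            | exact absurd hlt (by decide)
  rw [List.find?_cons_of_neg (p := fun chain => d.contains chain && (d.getD chain "" != "")) h7]
  simp only [List.find?_nil]
  refine (fold_first8 d.items ?_).symm
  intro p hp2 hcp
  by_cases hpm : p.1 ∈ pvPriority
  · exfalso
    have hpred : (d.contains p.1 && (d.getD p.1 "" != "")) = true := by
      rw [pred1_iff d hnd]
      refine ⟨p.2, by simpa using hp2, ?_⟩
      have := (Bool.and_eq_true _ _).mp hcp |>.1
      simpa using this
    rw [mem_priority_iff] at hpm
    rcases hpm with h|h|h|h|h|h|h|h <;> rw [h] at hpred <;>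
      first | exact h0 hpred | exact h1 hpred | exact h2 hpred | exact h3 hpred
            | exact h4 hpred | exact h5 hpred | exact h6 hpred | exact h7 hpred
  · exact rank_of_not_mem hpm

lemma a_eq_core (platforms : List (String × String)) :
    detect_evm_chain_py platforms =
      (match (["ethereum", "binance-smart-chain", "polygon-pos",
               "arbitrum-one", "optimistic-ethereum", "base",
               "avalanche", "fantom"].find?
               (fun chain => (PySem.Dict.ofList platforms).contains chain
                 && ((PySem.Dict.ofList platforms).getD chain "" != ""))) with
       | some chain => some chain
       | none => ((PySem.Dict.ofList platforms).items.find?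
           (fun p => pvEVM.contains p.1 && p.2 != "")).map (fun p => p.1)) := rfl

-- ===== VERDICT (by name: the statement is the Claim_ definition above) =====
theorem detect_evm_chain_py_spec : Claim_equal_detect_evm_chain_py := by
  intro platforms _
  unfold Spec_detect_evm_chain_py
  rw [a_eq_core, alt_eq_foldl]
  exact core (PySem.Dict.ofList platforms) (PySem.Dict.nodup_keys_ofList platforms)
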